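-- pv_equiv track=rewrite | github.com/Angel669988/x-ai-trends-digest | scripts/fetch_x_trends.py | _source_weight
-- ===== SOURCE A (Python) =====
-- def _source_weight(item):
--     source = (item.get("source") or item.get("author") or "").lower()
--     if "karpathy" in source:
--         return 3
--     official_keywords = (
--         "openai",
--         "anthropic",
--         "deepmind",
--         "google",
--         "microsoft",
--         "cohere",
--         "hugging face",
--     )
--     if any(key in source for key in official_keywords):
--         return 2
--     if "arxiv" in source:
--         return 0
--     return 1
-- ===== SOURCE B (Python) =====
-- _SCORES = {
--     "karpathy": 3,
--     "openai": 2,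
--     "anthropic": 2,
--     "deepmind": 2,
--     "google": 2,
--     "microsoft": 2,
--     "cohere": 2,
--     "hugging face": 2,
--     "arxiv": 0,
-- }
--
--
-- def _source_weight(item):
--     source = (item.get("source") or item.get("author") or "").lower()
--     return max((w for k, w in _SCORES.items() if k in source), default=1)
-- ===== Notes on version B (the rewrite author's own statement) =====
-- stated objective: alternative
-- what changed: Replaces A's ordered first-match branch cascade with an order-independent aggregation: every keyword is scored in one table and the result is the maximum matched score (default 1), which coincides with the cascade because the scores are consistent with its priority order.
import Mathlib
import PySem

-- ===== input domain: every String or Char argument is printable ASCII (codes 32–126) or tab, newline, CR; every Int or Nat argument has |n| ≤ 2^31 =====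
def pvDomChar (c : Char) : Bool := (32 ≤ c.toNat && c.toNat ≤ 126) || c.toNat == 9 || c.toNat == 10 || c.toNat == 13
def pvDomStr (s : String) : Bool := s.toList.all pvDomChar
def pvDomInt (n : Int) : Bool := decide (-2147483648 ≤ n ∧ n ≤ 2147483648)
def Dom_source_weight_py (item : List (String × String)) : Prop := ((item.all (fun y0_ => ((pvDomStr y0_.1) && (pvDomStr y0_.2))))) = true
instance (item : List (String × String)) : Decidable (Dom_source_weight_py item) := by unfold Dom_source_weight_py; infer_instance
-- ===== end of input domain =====

-- B replaces A's ordered branch cascade by a max-aggregation over a single keyword-score table (alternative, same cost); equivalence proved below.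


-- ===== PORT A =====
-- helper: Python's  `x or y`  on an optional string (None and "" are falsy)
def pvOrStr (x : Option String) (y : String) : String :=
  match x with
  | some s => if s = "" then y else s
  | none => y

-- A: branch cascade, transliterated step for step
def source_weight_py (item : List (String × String)) : Int :=
  let source := PySem.Str.lower
    (pvOrStr ((PySem.Dict.mk item).get? "source")
      (pvOrStr ((PySem.Dict.mk item).get? "author") ""))
  if PySem.Str.isIn "karpathy" source then 3
  else
    let official_keywords := ["openai", "anthropic", "deepmind", "google",
      "microsoft", "cohere", "hugging face"]
    if official_keywords.any (fun key => PySem.Str.isIn key source) then 2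
    else if PySem.Str.isIn "arxiv" source then 0
    else 1

-- ===== PORT B =====
-- B helpers: Python's max(list, default=d)
def pvMaxD (l : List Int) (d : Int) : Int :=
  match l with
  | [] => d
  | x :: xs => xs.foldl max x

-- B: one keyword→score table (dict, insertion order)
def pvScores : List (String × Int) :=
  [("karpathy", 3), ("openai", 2), ("anthropic", 2), ("deepmind", 2),
   ("google", 2), ("microsoft", 2), ("cohere", 2), ("hugging face", 2),
   ("arxiv", 0)]

def source_weight_py_alt (item : List (String × String)) : Int :=
  let source := PySem.Str.lower
    (pvOrStr ((PySem.Dict.mk item).get? "source")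
      (pvOrStr ((PySem.Dict.mk item).get? "author") ""))
  -- max((w for k, w in _SCORES.items() if k in source), default=1)
  pvMaxD (pvScores.filterMap
    (fun kw => if PySem.Str.isIn kw.1 source then some kw.2 else none)) 1

-- ===== PRECONDITION & SPEC =====
def Spec_source_weight_py (item : List (String × String)) (out : Int) : Prop := out = source_weight_py_alt item
instance (item : List (String × String)) (out : Int) : Decidable (Spec_source_weight_py item out) := by unfold Spec_source_weight_py; infer_instance

-- ===== CLAIM (what is proved, stated in full; the proofs are below) =====
def Claim_equal_source_weight_py : Prop := ∀ (item : List (String × String)), Dom_source_weight_py item → Spec_source_weight_py item (source_weight_py item)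

-- ===== LEMMAS AND PROOFS =====
-- Both ports compute the same `source`; the cascade agrees with the
-- max-aggregation because the table's scores respect the cascade's priority.

theorem pv_foldl_max_eq (l : List Int) (a m : Int)
    (hm : a = m ∨ m ∈ l) (ha : a ≤ m) (hle : ∀ x ∈ l, x ≤ m) :
    l.foldl max a = m := by
  induction l generalizing a with
  | nil => simpa using hm
  | cons y ys ih =>
    simp only [List.foldl_cons]
    have hy : y ≤ m := hle y (by simp)
    apply ih
    · rcases hm with hm | hm
      · left; subst hm; exact max_eq_left hy
      · rcases List.mem_cons.mp hm with hm | hm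
        · left; subst hm; exact max_eq_right ha
        · right; exact hm
    · exact max_le ha hy
    · exact fun x hx => hle x (by simp [hx])

theorem pvMaxD_eq_of_mem (l : List Int) (d m : Int) (hm : m ∈ l)
    (hle : ∀ x ∈ l, x ≤ m) : pvMaxD l d = m := by
  match l, hm with
  | x :: xs, hm =>
    simp only [pvMaxD]
    apply pv_foldl_max_eq
    · rcases List.mem_cons.mp hm with h | h
      · exact Or.inl h.symm
      · exact Or.inr h
    · exact hle x (by simp)
    · exact fun y hy => hle y (by simp [hy])

theorem pv_weights_agree (source : String) :
    (if PySem.Str.isIn "karpathy" source then (3 : Int)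
     else if (["openai", "anthropic", "deepmind", "google",
      "microsoft", "cohere", "hugging face"] : List String).any
        (fun key => PySem.Str.isIn key source) then 2
     else if PySem.Str.isIn "arxiv" source then 0
     else 1)
    = pvMaxD (pvScores.filterMap
        (fun kw => if PySem.Str.isIn kw.1 source then some kw.2 else none)) 1 := by
  by_cases hk : PySem.Str.isIn "karpathy" source
  · rw [if_pos hk]
    symm
    apply pvMaxD_eq_of_mem
    · exact List.mem_filterMap.mpr ⟨("karpathy", 3), by simp [pvScores], by rw [if_pos hk]⟩
    · intro x hx
      rw [List.mem_filterMap] at hx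
      obtain ⟨kw, hkw, hf⟩ := hx
      fin_cases hkw <;> split at hf <;> simp_all <;> omega
  · rw [if_neg hk]
    by_cases ho : (["openai", "anthropic", "deepmind", "google",
      "microsoft", "cohere", "hugging face"] : List String).any
        (fun key => PySem.Str.isIn key source)
    · rw [if_pos ho]
      symm
      apply pvMaxD_eq_of_mem
      · simp only [List.any_eq_true] at ho
        obtain ⟨key, hkey, hin⟩ := ho
        refine List.mem_filterMap.mpr ⟨(key, 2), ?_, by rw [if_pos hin]⟩
        fin_cases hkey <;> simp [pvScores]
      · intro x hx
        rw [List.mem_filterMap] at hx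
        obtain ⟨kw, hkw, hf⟩ := hx
        fin_cases hkw <;> split at hf <;> simp_all <;> omega
    · rw [if_neg ho]
      simp only [List.any_eq_true] at ho
      push_neg at ho
      have h1 := ho "openai" (by simp)
      have h2 := ho "anthropic" (by simp)
      have h3 := ho "deepmind" (by simp)
      have h4 := ho "google" (by simp)
      have h5 := ho "microsoft" (by simp)
      have h6 := ho "cohere" (by simp)
      have h7 := ho "hugging face" (by simp)
      clear ho
      simp at hk h1 h2 h3 h4 h5 h6 h7
      by_cases ha : PySem.Str.isIn "arxiv" source
      · rw [if_pos ha]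
        simp at ha
        simp [pvScores, pvMaxD, hk, h1, h2, h3, h4, h5, h6, h7, ha]
      · rw [if_neg ha]
        simp at ha
        simp [pvScores, pvMaxD, hk, h1, h2, h3, h4, h5, h6, h7, ha]

-- ===== VERDICT (by name: the statement is the Claim_ definition above) =====
theorem source_weight_py_spec : Claim_equal_source_weight_py := by
  intro item _
  unfold Spec_source_weight_py source_weight_py source_weight_py_alt
  exact pv_weights_agree _
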